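-- pv_equiv track=rewrite | github.com/memory-eight-way/memory | quiz/make_quiz.py | proc_line_mask_long_word
-- ===== SOURCE A (Python) =====
-- MASK_CHAR="_"
--
-- def make_len_dict(line):
--     w_words=line.split(" ")
--     di_len=dict()
--     for wele in w_words:
--         wlen=len(wele)
--         if wlen not in di_len:
--             di_len[wlen]=0
--         di_len[wlen]=di_len[wlen]+1
--     return di_len
--
-- def proc_line_mask_long_word(line,lv,slv):
--     di_len=make_len_dict(line)
--     wlenkeys=di_len.keys()
--     wlenkeys=sorted(wlenkeys,reverse=True)
--     wwordcounter=0
--     w_del_count=lv-slv+1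
--     w_del_len=0
--     for wchklen in wlenkeys:
--         wwordcounter=wwordcounter+di_len[wchklen]
--         if wwordcounter>=w_del_count:
--             w_del_len=wchklen
--             break
--     ##if w_del_len==0:
--     #    return ""
--     w_words=line.split(" ")
--     w_ret=list()
--     for w_word in w_words:
--         if len(w_word)>=w_del_len:
--             w_ret.append(MASK_CHAR*len(w_word))
--         else:
--             w_ret.append(w_word)
--     wretstr= " ".join(w_ret)
--     return wretstr
-- ===== SOURCE B (Python) =====
-- MASK_CHAR = "_"
--
-- def proc_line_mask_long_word(line, lv, slv):
--     words = line.split(" ")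
--     lengths = sorted((len(w) for w in words), reverse=True)
--     idx = lv - slv
--     if idx < 0:
--         thr = lengths[0]
--     elif idx >= len(lengths):
--         thr = 0
--     else:
--         thr = lengths[idx]
--     return " ".join(MASK_CHAR * len(w) if len(w) >= thr else w for w in words)
-- ===== Notes on version B (the rewrite author's own statement) =====
-- stated objective: simpler
-- what changed: Replaces the length-frequency dict plus the distinct-length cumulative-count break loop with one sorted list of word lengths indexed directly at rank lv-slv (clamped), then masks in a single join.
import Mathlib
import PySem

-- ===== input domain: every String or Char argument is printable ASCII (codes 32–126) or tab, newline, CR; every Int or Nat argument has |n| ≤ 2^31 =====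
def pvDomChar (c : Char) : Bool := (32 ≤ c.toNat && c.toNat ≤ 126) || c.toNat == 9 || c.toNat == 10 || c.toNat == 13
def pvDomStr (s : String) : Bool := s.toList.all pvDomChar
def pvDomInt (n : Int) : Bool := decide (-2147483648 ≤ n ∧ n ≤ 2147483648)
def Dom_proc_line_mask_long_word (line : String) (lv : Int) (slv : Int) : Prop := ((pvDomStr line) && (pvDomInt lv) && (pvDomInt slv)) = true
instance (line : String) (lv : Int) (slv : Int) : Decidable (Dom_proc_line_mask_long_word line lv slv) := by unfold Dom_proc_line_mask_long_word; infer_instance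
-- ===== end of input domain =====

-- B replaces A's length-frequency dict and cumulative distinct-length break loop by one
-- sorted list of word lengths indexed directly at rank lv-slv (clamped); objective: simpler.

-- ===== PORT A =====
-- helper: Python's make_len_dict (length-frequency dict built word by word)
def make_len_dict (line : String) : PySem.Dict Int Int :=
  let w_words := (PySem.Str.split? line " ").getD []   -- sep ≠ "" so split? is always some
  w_words.foldl (fun di_len wele =>
    let wlen : Int := PySem.Str.len wele
    let di_len := if di_len.contains wlen then di_len else di_len.insert wlen 0
    di_len.insert wlen (di_len.getD wlen 0 + 1)) PySem.Dict.empty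

-- helper: A's 'for wchklen in wlenkeys: … break' loop (returns w_del_len)
def maskLenLoop (di_len : PySem.Dict Int Int) (w_del_count : Int) : List Int → Int → Int
  | [], _ => 0
  | wchklen :: rest, wwordcounter =>
    let c := wwordcounter + di_len.getD wchklen 0
    if c ≥ w_del_count then wchklen else maskLenLoop di_len w_del_count rest c

def proc_line_mask_long_word (line : String) (lv : Int) (slv : Int) : String :=
  let di_len := make_len_dict line
  let wlenkeys := PySem.List.sorted di_len.keys (fun k => k) true
  let w_del_count := lv - slv + 1
  let w_del_len := maskLenLoop di_len w_del_count wlenkeys 0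
  let w_words := (PySem.Str.split? line " ").getD []
  let w_ret := w_words.foldl (fun w_ret w_word =>
    if PySem.Str.len w_word ≥ w_del_len then
      w_ret ++ [String.ofList (List.replicate (PySem.Str.len w_word).toNat '_')]
    else
      w_ret ++ [w_word]) []
  PySem.Str.join " " w_ret

-- ===== PORT B =====
def proc_line_mask_long_word_alt (line : String) (lv : Int) (slv : Int) : String :=
  let words := (PySem.Str.split? line " ").getD []   -- sep ≠ "" so split? is always some
  let lengths := PySem.List.sorted (words.map (fun w => PySem.Str.len w)) (fun x => x) true
  let idx := lv - slv
  let thr : Int :=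
    if idx < 0 then lengths.headD 0     -- lengths is never empty in Python; headD is its lengths[0]
    else if idx ≥ (lengths.length : Int) then 0
    else lengths.getD idx.toNat 0
  PySem.Str.join " " (words.map (fun w =>
    if PySem.Str.len w ≥ thr then String.ofList (List.replicate (PySem.Str.len w).toNat '_') else w))

-- ===== PRECONDITION & SPEC =====
def Spec_proc_line_mask_long_word (line : String) (lv : Int) (slv : Int) (out : String) : Prop := out = proc_line_mask_long_word_alt line lv slv
instance (line : String) (lv : Int) (slv : Int) (out : String) : Decidable (Spec_proc_line_mask_long_word line lv slv out) := by unfold Spec_proc_line_mask_long_word; infer_instance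

-- ===== CLAIM (what is proved, stated in full; the proofs are below) =====
def Claim_equal_proc_line_mask_long_word : Prop := ∀ (line : String) (lv : Int) (slv : Int), Dom_proc_line_mask_long_word line lv slv → Spec_proc_line_mask_long_word line lv slv (proc_line_mask_long_word line lv slv)

-- ===== LEMMAS AND PROOFS =====

-- one body of A's dict loop collapses to the counter's single insert
lemma step_eq (d : PySem.Dict Int Int) (x : Int) :
    (let d' := if d.contains x then d else d.insert x 0; d'.insert x (d'.getD x 0 + 1))
      = d.insert x (d.getD x 0 + 1) := by
  by_cases h : d.contains x
  · simp [h]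
  · simp only [h, Bool.false_eq_true, if_false]
    rw [PySem.Dict.getD_insert_self, PySem.Dict.insert_insert_self]
    have h0 : d.get? x = none := (PySem.Dict.get?_eq_none_iff_contains d x).2 (by simpa using h)
    simp [PySem.Dict.getD, h0]

-- A's dict build is the standard counter of the word lengths.
lemma make_len_dict_eq_counter (line : String) :
    make_len_dict line
      = PySem.Dict.counter (((PySem.Str.split? line " ").getD []).map (fun w => PySem.Str.len w)) := by
  unfold make_len_dict
  rw [← PySem.Dict.foldl_insert_getD_add_one_eq_counter, List.foldl_map]
  have hf : (fun (di_len : PySem.Dict Int Int) (wele : String) =>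
      let wlen : Int := PySem.Str.len wele
      let di_len := if di_len.contains wlen then di_len else di_len.insert wlen 0
      di_len.insert wlen (di_len.getD wlen 0 + 1))
      = fun d w => d.insert (PySem.Str.len w) (d.getD (PySem.Str.len w) 0 + 1) :=
    funext fun d => funext fun w => step_eq d (PySem.Str.len w)
  rw [hf]

-- a >=-sorted list whose elements are all <= k splits as (copies of k) ++ (elements < k)
lemma desc_split_max (k : Int) : ∀ (L : List Int), L.Pairwise (· ≥ ·) → (∀ x ∈ L, x ≤ k) →
    L = List.replicate (L.count k) k ++ L.filter (· != k) ∧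
    ∀ x ∈ L.filter (· != k), x < k := by
  intro L
  induction L with
  | nil => simp
  | cons a t ih =>
    intro hp hle
    obtain ⟨hrel, ht⟩ := List.pairwise_cons.1 hp
    by_cases hak : a = k
    · subst hak
      obtain ⟨e1, e2⟩ := ih ht (fun x hx => hle x (List.mem_cons_of_mem _ hx))
      refine ⟨?_, ?_⟩
      · have : (a :: t).count a = t.count a + 1 := List.count_cons_self
        rw [this]
        simp only [List.replicate_succ, List.filter_cons, bne_self_eq_false]
        simp only [List.cons_append]
        exact congrArg (a :: ·) e1
      · intro x hx
        simp only [List.filter_cons, bne_self_eq_false] at hx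
        exact e2 x (by simpa using hx)
    · have hak' : a < k := lt_of_le_of_ne (hle a (List.mem_cons_self)) hak
      have hknt : k ∉ t := fun h => absurd (hrel k h) (by omega)
      have hkn : k ∉ a :: t := by simp [hknt]; omega
      have hc : (a :: t).count k = 0 := List.count_eq_zero.2 hkn
      have hft : t.filter (· != k) = t := List.filter_eq_self.2 (fun x hx => by
        simp only [bne_iff_ne, ne_eq]
        intro h; exact hknt (h ▸ hx))
      refine ⟨?_, ?_⟩
      · rw [hc]
        simp [bne_iff_ne, hak, hft]
      · intro x hx
        simp only [List.filter_cons] at hx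
        rw [if_pos (by simpa [bne_iff_ne] using hak)] at hx
        rcases List.mem_cons.1 hx with rfl | hx'
        · exact hak'
        · have : x ∈ t := by rw [hft] at hx'; exact hx'
          exact lt_of_le_of_lt (hrel x this) hak'

-- the heads of a >=-sorted list and of its sorted distinct values agree
lemma headD_eq_headD (ks L : List Int) (hks : ks.Pairwise (· > ·)) (hL : L.Pairwise (· ≥ ·))
    (hmem : ∀ x, x ∈ L ↔ x ∈ ks) : L.headD 0 = ks.headD 0 := by
  match ks, L with
  | [], [] => rfl
  | [], a :: t => exact absurd ((hmem a).1 (List.mem_cons_self)) (by simp)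
  | b :: t', [] => exact absurd ((hmem b).2 (List.mem_cons_self)) (by simp)
  | b :: t', a :: t =>
    obtain ⟨hb, _⟩ := List.pairwise_cons.1 hks
    obtain ⟨ha, _⟩ := List.pairwise_cons.1 hL
    have h1 : b ≤ a := by
      rcases List.mem_cons.1 ((hmem b).2 (List.mem_cons_self)) with rfl | h
      · exact le_refl _
      · exact ha b h
    have h2 : a ≤ b := by
      rcases List.mem_cons.1 ((hmem a).1 (List.mem_cons_self)) with rfl | h
      · exact le_refl _
      · exact le_of_lt (hb a h)
    simp only [List.headD_cons]
    omega

-- A's cumulative break loop over the distinct lengths, descending, is direct rank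
-- selection in the >=-sorted multiset L of all the lengths.
lemma loop_eq_rank (di : PySem.Dict Int Int) (m : Int) :
    ∀ (ks L : List Int), ks.Pairwise (· > ·) → L.Pairwise (· ≥ ·) →
    (∀ x, x ∈ L ↔ x ∈ ks) → (∀ x ∈ ks, di.getD x 0 = (L.count x : Int)) →
    ∀ acc : Int,
    maskLenLoop di m ks acc =
      if m - acc ≤ 0 then ks.headD 0
      else if (L.length : Int) < m - acc then 0
      else L.getD (m - acc - 1).toNat 0 := by
  intro ks
  induction ks with
  | nil =>
    intro L _ _ hmem _ acc
    have hL : L = [] := List.eq_nil_iff_forall_not_mem.2 (fun x hx => by simpa using (hmem x).1 hx)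
    subst hL
    simp only [maskLenLoop, List.headD_nil, List.length_nil, Nat.cast_zero, List.getD_nil]
    split_ifs <;> omega
  | cons k ks' ih =>
    intro L hks hL hmem hcnt acc
    obtain ⟨hkgt, hks'⟩ := List.pairwise_cons.1 hks
    have hkmax : ∀ x ∈ L, x ≤ k := by
      intro x hx
      rcases List.mem_cons.1 ((hmem x).1 hx) with rfl | h
      · exact le_refl _
      · exact le_of_lt (hkgt x h)
    obtain ⟨hdec, hltk⟩ := desc_split_max k L hL hkmax
    have hkL : k ∈ L := (hmem k).2 (List.mem_cons_self)
    have hcpos : 0 < L.count k := List.count_pos_iff.2 hkL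
    set c := L.count k with hc
    set L' := L.filter (· != k) with hL'
    have hlen : L.length = c + L'.length := by
      conv_lhs => rw [hdec]
      simp [List.length_append]
    have hdik : di.getD k 0 = (c : Int) := hcnt k (List.mem_cons_self)
    simp only [maskLenLoop, hdik]
    by_cases hstop : acc + (c : Int) ≥ m
    · rw [if_pos hstop]
      by_cases h0 : m - acc ≤ 0
      · rw [if_pos h0]; rfl
      · rw [if_neg h0, if_neg (by push_cast [hlen]; omega)]
        have hidx : (m - acc - 1).toNat < c := by omega
        conv_rhs => rw [hdec]
        rw [List.getD_append _ _ _ _ (by simpa using hidx)]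
        rw [List.getD_eq_getElem?_getD, List.getElem?_replicate,
          if_pos hidx]
        rfl
    · rw [if_neg hstop]
      have hmem' : ∀ x, x ∈ L' ↔ x ∈ ks' := by
        intro x
        constructor
        · intro hx
          have hxk : x ≠ k := by have := hltk x hx; omega
          have : x ∈ L := List.mem_of_mem_filter hx
          rcases List.mem_cons.1 ((hmem x).1 this) with rfl | h
          · exact absurd rfl hxk
          · exact h
        · intro hx
          have hxk : x ≠ k := by have := hkgt x hx; omega
          have hxL : x ∈ L := (hmem x).2 (List.mem_cons_of_mem _ hx)
          exact List.mem_filter.2 ⟨hxL, by simpa [bne_iff_ne] using hxk⟩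
      have hcnt' : ∀ x ∈ ks', di.getD x 0 = (L'.count x : Int) := by
        intro x hx
        have hxk : x ≠ k := by have := hkgt x hx; omega
        rw [hcnt x (List.mem_cons_of_mem _ hx), hL',
          List.count_filter (by simpa [bne_iff_ne] using hxk)]
      rw [ih L' hks' (hL.filter _) hmem' hcnt' (acc + c)]
      rw [if_neg (show ¬ m - (acc + (c : Int)) ≤ 0 by omega),
        if_neg (show ¬ m - acc ≤ 0 by omega)]
      by_cases hbig : (L.length : Int) < m - acc
      · rw [if_pos (show ((L'.length : Int)) < m - (acc + (c : Int)) by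
          push_cast [hlen] at hbig ⊢; omega), if_pos hbig]
      · rw [if_neg (show ¬ ((L'.length : Int)) < m - (acc + (c : Int)) by
          push_cast [hlen] at hbig ⊢; omega), if_neg hbig]
        conv_rhs => rw [hdec]
        rw [List.getD_append_right _ _ _ _ (by simp; omega)]
        congr 1
        simp
        omega

-- ===== VERDICT (by name: the statement is the Claim_ definition above) =====
theorem proc_line_mask_long_word_spec : Claim_equal_proc_line_mask_long_word := by
  intro line lv slv _
  unfold Spec_proc_line_mask_long_word
  simp only [proc_line_mask_long_word, proc_line_mask_long_word_alt]
  rw [make_len_dict_eq_counter, PySem.Dict.keys_counter]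
  set W := (PySem.Str.split? line " ").getD [] with hW
  set lens := W.map (fun w => PySem.Str.len w) with hlens
  set ks := PySem.List.sorted (PySem.Set.ofList lens) (fun k => k) true with hks
  set L := PySem.List.sorted lens (fun x => x) true with hL
  have hnd : ks.Pairwise (· ≠ ·) :=
    ((PySem.List.sorted_perm (PySem.Set.ofList lens) (fun k => k) true).nodup_iff.2
      (PySem.Set.nodup_ofList lens))
  have hksd : ks.Pairwise (· > ·) :=
    ((PySem.List.sorted_pairwise_rev (PySem.Set.ofList lens) (fun k => k)).and hnd).imp
      (fun h => by omega)
  have hLd : L.Pairwise (· ≥ ·) := PySem.List.sorted_pairwise_rev lens (fun x => x)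
  have hmem : ∀ x, x ∈ L ↔ x ∈ ks := by
    intro x
    rw [PySem.List.mem_sorted, PySem.List.mem_sorted, PySem.Set.mem_ofList]
  have hcnt : ∀ x ∈ ks, (PySem.Dict.counter lens).getD x 0 = (L.count x : Int) := by
    intro x _
    rw [PySem.Dict.getD_counter,
      ((PySem.List.sorted_perm lens (fun x => x) true).count_eq x)]
  rw [loop_eq_rank (PySem.Dict.counter lens) (lv - slv + 1) ks L hksd hLd hmem hcnt 0]
  have hthr :
      (if lv - slv + 1 - 0 ≤ 0 then ks.headD 0
       else if (L.length : Int) < lv - slv + 1 - 0 then 0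
       else L.getD (lv - slv + 1 - 0 - 1).toNat 0)
      = (if lv - slv < 0 then L.headD 0
         else if lv - slv ≥ (L.length : Int) then 0
         else L.getD (lv - slv).toNat 0) := by
    by_cases h1 : lv - slv < 0
    · rw [if_pos (by omega : lv - slv + 1 - 0 ≤ 0), if_pos h1,
        headD_eq_headD ks L hksd hLd hmem]
    · rw [if_neg (by omega : ¬ lv - slv + 1 - 0 ≤ 0), if_neg h1]
      by_cases h2 : lv - slv ≥ (L.length : Int)
      · rw [if_pos (by omega : (L.length : Int) < lv - slv + 1 - 0), if_pos h2]
      · rw [if_neg (by omega : ¬ (L.length : Int) < lv - slv + 1 - 0), if_neg h2]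
        congr 1
        omega
  rw [hthr]
  rw [show (fun (w_ret : List String) (w_word : String) =>
        if PySem.Str.len w_word ≥ (if lv - slv < 0 then L.headD 0
            else if lv - slv ≥ (L.length : Int) then 0
            else L.getD (lv - slv).toNat 0) then
          w_ret ++ [String.ofList (List.replicate (PySem.Str.len w_word).toNat '_')]
        else w_ret ++ [w_word])
      = (fun w_ret w_word => w_ret ++
          [if PySem.Str.len w_word ≥ (if lv - slv < 0 then L.headD 0
              else if lv - slv ≥ (L.length : Int) then 0
              else L.getD (lv - slv).toNat 0) then
            String.ofList (List.replicate (PySem.Str.len w_word).toNat '_')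
          else w_word]) from funext fun a => funext fun w => by split_ifs <;> rfl]
  rw [PySem.List.foldl_append_singleton_eq_map, List.nil_append]
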